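-- pv_equiv track=rewrite | github.com/alozan08/Practice-Problems | AuthoringAssistant.py | replace_punctuation
-- ===== SOURCE A (Python) =====
-- def replace_punctuation(sample_txt, exclamation_count = 0, semicolon_count = 0):
--     corrected = ''
--     for c in sample_txt:
--         if c == '!':
--             corrected += '.'
--             exclamation_count += 1
--         elif c == ';':
--             corrected += ','
--             semicolon_count += 1
--         else:
--             corrected += c
--     return corrected, exclamation_count, semicolon_count
-- ===== SOURCE B (Python) =====
-- def replace_punctuation(sample_txt, exclamation_count = 0, semicolon_count = 0):
--     corrected = sample_txt.replace('!', '.').replace(';', ',')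
--     return (corrected,
--             exclamation_count + sample_txt.count('!'),
--             semicolon_count + sample_txt.count(';'))
-- ===== Notes on version B (the rewrite author's own statement) =====
-- stated objective: faster
-- what changed: The single fused character loop that accumulates the corrected string and both counters via repeated string concatenation is replaced by four independent library scans: two chained str.replace calls build the corrected text and two str.count calls add the tallies to the incoming counters.
import Mathlib
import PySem

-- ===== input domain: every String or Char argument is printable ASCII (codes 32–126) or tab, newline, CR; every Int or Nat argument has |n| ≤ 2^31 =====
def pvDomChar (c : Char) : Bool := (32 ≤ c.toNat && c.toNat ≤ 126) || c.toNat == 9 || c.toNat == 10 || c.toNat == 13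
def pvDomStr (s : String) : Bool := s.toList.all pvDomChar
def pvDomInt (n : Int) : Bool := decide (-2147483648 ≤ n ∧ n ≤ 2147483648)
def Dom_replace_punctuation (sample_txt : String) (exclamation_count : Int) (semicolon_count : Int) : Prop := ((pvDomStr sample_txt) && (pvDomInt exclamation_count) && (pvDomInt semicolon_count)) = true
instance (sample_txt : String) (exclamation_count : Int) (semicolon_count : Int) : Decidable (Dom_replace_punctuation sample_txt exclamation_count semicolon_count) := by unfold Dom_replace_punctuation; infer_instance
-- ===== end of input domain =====

-- B replaces A's single fused accumulating loop by independent library scans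
-- (two chained replace calls plus two count calls), avoiding quadratic string concatenation; a timing run measured B faster.

-- ===== PORT A =====
-- one loop over the characters, accumulating the corrected text and both counters
def replace_punctuation (sample_txt : String) (exclamation_count : Int) (semicolon_count : Int) : String × Int × Int :=
  let st := sample_txt.toList.foldl
    (fun (st : List Char × Int × Int) c =>
      if c = '!' then (st.1 ++ ['.'], st.2.1 + 1, st.2.2)
      else if c = ';' then (st.1 ++ [','], st.2.1, st.2.2 + 1)
      else (st.1 ++ [c], st.2.1, st.2.2))
    ([], exclamation_count, semicolon_count)
  (String.ofList st.1, st.2.1, st.2.2)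

-- ===== PORT B =====
def replace_punctuation_alt (sample_txt : String) (exclamation_count : Int) (semicolon_count : Int) : String × Int × Int :=
  (PySem.Str.replace (PySem.Str.replace sample_txt "!" ".") ";" ",",
   exclamation_count + (PySem.Str.count sample_txt "!" : Int),
   semicolon_count + (PySem.Str.count sample_txt ";" : Int))

-- ===== PRECONDITION & SPEC =====
def Spec_replace_punctuation (sample_txt : String) (exclamation_count : Int) (semicolon_count : Int) (out : String × Int × Int) : Prop := out = replace_punctuation_alt sample_txt exclamation_count semicolon_count
instance (sample_txt : String) (exclamation_count : Int) (semicolon_count : Int) (out : String × Int × Int) : Decidable (Spec_replace_punctuation sample_txt exclamation_count semicolon_count out) := by unfold Spec_replace_punctuation; infer_instance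

-- ===== CLAIM (what is proved, stated in full; the proofs are below) =====
def Claim_equal_replace_punctuation : Prop := ∀ (sample_txt : String) (exclamation_count : Int) (semicolon_count : Int), Dom_replace_punctuation sample_txt exclamation_count semicolon_count → Spec_replace_punctuation sample_txt exclamation_count semicolon_count (replace_punctuation sample_txt exclamation_count semicolon_count)

-- ===== LEMMAS AND PROOFS =====

-- single-character replace is a map
theorem replace_go_single (o n : Char) :
    ∀ (l acc : List Char) (fuel : Nat), l.length ≤ fuel →
      PySem.Chars.replace.go [o] [n] fuel l acc
        = acc.reverse ++ l.map (fun c => if c = o then n else c) := by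
  intro l
  induction l with
  | nil =>
    intro acc fuel _
    cases fuel <;> simp [PySem.Chars.replace.go]
  | cons c t ih =>
    intro acc fuel hf
    cases fuel with
    | zero => simp at hf
    | succ fuel =>
      simp only [List.length_cons] at hf
      by_cases h : c = o
      · subst h
        simp only [PySem.Chars.replace.go]
        rw [if_pos (by simp [List.isPrefixOf])]
        simp only [List.length_cons, List.length_nil, List.drop_succ_cons,
          List.drop_zero, List.reverse_cons, List.reverse_nil, List.nil_append]
        rw [ih _ fuel (by omega)]
        simp
      · simp only [PySem.Chars.replace.go]
        rw [if_neg (by simp only [List.isPrefixOf, Bool.and_eq_true, beq_iff_eq]; exact fun hp => h hp.1.symm)]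
        rw [ih _ fuel (by omega)]
        simp [h]

theorem replace_single (o n : Char) (l : List Char) :
    PySem.Chars.replace l [o] [n] = l.map (fun c => if c = o then n else c) := by
  simp [PySem.Chars.replace, replace_go_single o n l [] l.length le_rfl]

-- single-character count is List.count
theorem count_go_single (o : Char) :
    ∀ (l : List Char) (acc fuel : Nat), l.length ≤ fuel →
      PySem.Chars.count.go [o] fuel l acc = acc + l.count o := by
  intro l
  induction l with
  | nil =>
    intro acc fuel _
    cases fuel <;> simp [PySem.Chars.count.go]
  | cons c t ih =>
    intro acc fuel hf
    cases fuel with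
    | zero => simp at hf
    | succ fuel =>
      simp only [List.length_cons] at hf
      by_cases h : c = o
      · subst h
        simp only [PySem.Chars.count.go]
        rw [if_pos (by simp [List.isPrefixOf])]
        simp only [List.length_cons, List.length_nil, List.drop_succ_cons, List.drop_zero]
        rw [ih _ fuel (by omega)]
        simp
        omega
      · simp only [PySem.Chars.count.go]
        rw [if_neg (by simp only [List.isPrefixOf, Bool.and_eq_true, beq_iff_eq]; exact fun hp => h hp.1.symm)]
        rw [ih _ fuel (by omega)]
        simp [h]

theorem count_single (o : Char) (l : List Char) :
    PySem.Chars.count l [o] = l.count o := by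
  simp [PySem.Chars.count, count_go_single o l 0 l.length le_rfl]

-- invariant of A's fused loop
theorem loopA_inv (l : List Char) :
    ∀ (acc : List Char) (e s : Int),
      l.foldl
        (fun (st : List Char × Int × Int) c =>
          if c = '!' then (st.1 ++ ['.'], st.2.1 + 1, st.2.2)
          else if c = ';' then (st.1 ++ [','], st.2.1, st.2.2 + 1)
          else (st.1 ++ [c], st.2.1, st.2.2))
        (acc, e, s)
      = (acc ++ l.map (fun c => if c = '!' then '.' else if c = ';' then ',' else c),
         e + (l.count '!' : Int), s + (l.count ';' : Int)) := by
  induction l with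
  | nil => intro acc e s; simp
  | cons c t ih =>
    intro acc e s
    by_cases h1 : c = '!'
    · subst h1
      simp only [List.foldl_cons]
      rw [ih]
      simp
      ring
    · by_cases h2 : c = ';'
      · subst h2
        simp only [List.foldl_cons]
        rw [ih]
        simp
        ring
      · simp only [List.foldl_cons, if_neg h1, if_neg h2]
        rw [ih]
        simp [h1, h2]

-- ===== VERDICT (by name: the statement is the Claim_ definition above) =====
theorem replace_punctuation_spec : Claim_equal_replace_punctuation := by
  intro s e c _
  unfold Spec_replace_punctuation replace_punctuation replace_punctuation_alt
  rw [loopA_inv]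
  refine Prod.ext ?_ (by simp [PySem.Str.count_eq, count_single])
  apply String.ext
  simp only [PySem.Str.toList_replace, String.toList_ofList]
  have h1 : ("!" : String).toList = ['!'] := rfl
  have h2 : (";" : String).toList = [';'] := rfl
  have h3 : ("." : String).toList = ['.'] := rfl
  have h4 : ("," : String).toList = [','] := rfl
  rw [h1, h2, h3, h4, replace_single, replace_single, List.map_map]
  apply List.map_congr_left
  intro x _
  by_cases hx1 : x = '!' <;> by_cases hx2 : x = ';' <;>
    simp_all
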